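-- pv_equiv track=rewrite | github.com/Soumen3/Python-Programs | Accenture/Practice6.py | LargeSmallSum
-- ===== SOURCE A (Python) =====
-- def LargeSmallSum(arr):
--     if len(arr)<=3:
--         return 0
--
--     even_large, even_second_large = 0, 0
--     odd_small, odd_second_small = float('inf'), float('inf')
--
--     for i in range(len(arr)):
--         if i%2 == 0:
--             if arr[i] > even_large:
--                 even_second_large = even_large
--                 even_large = arr[i]
--             elif arr[i] > even_second_large:
--                 even_second_large = arr[i]
--         else:
--             if arr[i] < odd_small:
--                 odd_second_small = odd_small
--                 odd_small = arr[i]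
--             elif arr[i] < odd_second_small:
--                 odd_second_small = arr[i]
--
--     return even_second_large + odd_second_small
-- ===== SOURCE B (Python) =====
-- def LargeSmallSum(arr):
--     if len(arr) <= 3:
--         return 0
--     evens = sorted(arr[0::2] + [0, 0])
--     odds = sorted(arr[1::2])
--     return evens[-2] + odds[1]
-- ===== Notes on version B (the rewrite author's own statement) =====
-- stated objective: idiomatic
-- what changed: Replaces A's single streaming pass that tracks running top-2/bottom-2 extrema with a slice-then-sort formulation: evens = arr[0::2] padded with the two 0 baselines, odds = arr[1::2], then index the sorted lists for the second-largest and second-smallest.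
import Mathlib
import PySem

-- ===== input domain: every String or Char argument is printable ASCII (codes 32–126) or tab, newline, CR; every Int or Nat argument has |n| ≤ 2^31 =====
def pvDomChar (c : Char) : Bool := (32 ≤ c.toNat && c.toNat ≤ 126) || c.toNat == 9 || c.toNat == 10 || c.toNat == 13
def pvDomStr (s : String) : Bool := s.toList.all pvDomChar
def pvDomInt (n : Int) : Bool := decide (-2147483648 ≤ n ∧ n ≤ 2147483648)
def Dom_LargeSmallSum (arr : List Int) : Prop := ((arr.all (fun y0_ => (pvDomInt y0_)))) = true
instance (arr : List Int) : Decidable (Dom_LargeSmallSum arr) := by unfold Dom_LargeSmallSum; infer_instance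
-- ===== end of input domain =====

-- B replaces A's streaming top-2/bottom-2 pass by slicing the even/odd positions, sorting, and indexing (idiomatic; return value only, no mutation).

-- ===== PORT A =====
-- `none` plays Python's float('inf') initial value of odd_small / odd_second_small:
-- `x < inf` is true for every int x.
def pvLtInf (x : Int) (o : Option Int) : Bool :=
  match o with
  | none => true
  | some y => decide (x < y)

-- the `for i in range(len(arr))` loop: i counts up, state (even_large, even_second_large), (odd_small, odd_second_small)
def pvLoopA : List Int → Nat → (Int × Int) → (Option Int × Option Int) → (Int × Int) × (Option Int × Option Int)
  | [], _, e, o => (e, o)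
  | x :: t, i, (el, esl), (os, oss) =>
    if i % 2 = 0 then
      if el < x then pvLoopA t (i+1) (x, el) (os, oss)
      else if esl < x then pvLoopA t (i+1) (el, x) (os, oss)
      else pvLoopA t (i+1) (el, esl) (os, oss)
    else
      if pvLtInf x os then pvLoopA t (i+1) (el, esl) (some x, os)
      else if pvLtInf x oss then pvLoopA t (i+1) (el, esl) (os, some x)
      else pvLoopA t (i+1) (el, esl) (os, oss)

def LargeSmallSum (arr : List Int) : Int :=
  if arr.length ≤ 3 then 0
  else
    let r := pvLoopA arr 0 (0, 0) (none, none)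
    -- the `.getD 0` is never used: with len(arr) ≥ 4 there are ≥ 2 odd positions, so the option is some
    r.1.2 + (r.2.2.getD 0)

-- ===== PORT B =====
def LargeSmallSum_alt (arr : List Int) : Int :=
  if arr.length ≤ 3 then 0
  else
    -- evens = sorted(arr[0::2] + [0, 0]); odds = sorted(arr[1::2])
    let evens := PySem.List.sorted (((PySem.List.slice? arr (some 0) none 2).getD []) ++ [0, 0]) (fun x => x) false
    let odds := PySem.List.sorted ((PySem.List.slice? arr (some 1) none 2).getD []) (fun x => x) false
    -- evens[-2] + odds[1]; the `.getD 0` defaults are never used: both lists have length ≥ 2 when len(arr) ≥ 4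
    (PySem.List.pyGet? evens (-2)).getD 0 + (PySem.List.pyGet? odds 1).getD 0

-- ===== PRECONDITION & SPEC =====
def Spec_LargeSmallSum (arr : List Int) (out : Int) : Prop := out = LargeSmallSum_alt arr
instance (arr : List Int) (out : Int) : Decidable (Spec_LargeSmallSum arr out) := by unfold Spec_LargeSmallSum; infer_instance

-- ===== CLAIM (what is proved, stated in full; the proofs are below) =====
def Claim_equal_LargeSmallSum : Prop := ∀ (arr : List Int), Dom_LargeSmallSum arr → Spec_LargeSmallSum arr (LargeSmallSum arr)

-- ===== LEMMAS AND PROOFS =====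

-- the elements of arr at even positions (flag true) / odd positions (flag false)
def pvAlt : Bool → List Int → List Int
  | _, [] => []
  | true, x :: t => x :: pvAlt false t
  | false, _ :: t => pvAlt true t

theorem pvAlt_length : ∀ (l : List Int) (b : Bool),
    (pvAlt b l).length = if b then (l.length + 1) / 2 else l.length / 2 := by
  intro l
  induction l with
  | nil => intro b; cases b <;> simp [pvAlt]
  | cons x t ih =>
    intro b
    cases b <;> simp [pvAlt, ih] <;> omega

theorem pvFMeven : ∀ (xs : List Int),
    List.filterMap (fun k : Nat => xs[2 * k]?) (List.range ((xs.length + 1) / 2)) = pvAlt true xs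
  | [] => by simp [pvAlt]
  | [x] => by simp [pvAlt, List.range_succ]
  | x :: y :: t => by
    have ih := pvFMeven t
    rw [show (x :: y :: t).length = t.length + 2 from rfl,
      show (t.length + 2 + 1) / 2 = (t.length + 1) / 2 + 1 by omega, List.range_succ_eq_map, List.filterMap_cons, List.filterMap_map]
    simp only [Nat.mul_zero, List.getElem?_cons_zero]
    have : (fun k : Nat => (x :: y :: t)[2 * k]?) ∘ Nat.succ = fun k : Nat => t[2 * k]? := by
      funext k
      show (x :: y :: t)[2 * (k+1)]? = t[2 * k]?
      have : 2 * (k + 1) = (2 * k) + 1 + 1 := by ring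
      rw [this, List.getElem?_cons_succ, List.getElem?_cons_succ]
    rw [this, ih]
    rfl

theorem pvFModd : ∀ (xs : List Int),
    List.filterMap (fun k : Nat => xs[2 * k + 1]?) (List.range (xs.length / 2)) = pvAlt false xs
  | [] => by simp [pvAlt]
  | x :: t => by
    have ih := pvFMeven t
    rw [show (x :: t).length = t.length + 1 from rfl]
    have : (fun k : Nat => (x :: t)[2 * k + 1]?) = fun k : Nat => t[2 * k]? := by
      funext k; rw [List.getElem?_cons_succ]
    rw [this, ih]
    rfl

theorem pvSliceEvenAux (xs : List Int) :
    (PySem.List.slice? xs (some 0) none 2).getD [] =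
      List.filterMap (fun k : Nat => xs[2 * k]?) (List.range ((xs.length + 1) / 2)) := by
  unfold PySem.List.slice? PySem.List.sliceIndices
  norm_num
  split_ifs with h
  · have hc : (((xs.length : Int) + 2 - 1) / 2).toNat = (xs.length + 1) / 2 := by omega
    have hf : (fun k : Nat => xs[(2 * (k : Int)).toNat]?) = fun k : Nat => xs[2 * k]? := by
      funext k
      have : (2 * (k : Int)).toNat = 2 * k := by omega
      rw [this]
    rw [hc, hf]
  · have h0 : xs.length = 0 := by omega
    simp [h0]

theorem pvSliceOddAux (xs : List Int) :
    (PySem.List.slice? xs (some 1) none 2).getD [] =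
      List.filterMap (fun k : Nat => xs[2 * k + 1]?) (List.range (xs.length / 2)) := by
  unfold PySem.List.slice? PySem.List.sliceIndices
  norm_num
  split_ifs with h
  · have hm : min (1 : Int) (xs.length : Int) = 1 := by omega
    rw [hm]
    have hc : (((xs.length : Int) - 1 + 2 - 1) / 2).toNat = xs.length / 2 := by omega
    have hf : (fun k : Nat => xs[((1 : Int) + 2 * (k : Int)).toNat]?) = fun k : Nat => xs[2 * k + 1]? := by
      funext k
      have : ((1 : Int) + 2 * (k : Int)).toNat = 2 * k + 1 := by omega
      rw [this]
    rw [hc, hf]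
  · rw [show xs.length / 2 = 0 by omega]
    simp

theorem pvSliceEven (xs : List Int) :
    (PySem.List.slice? xs (some 0) none 2).getD [] = pvAlt true xs := by
  rw [pvSliceEvenAux, pvFMeven]

theorem pvSliceOdd (xs : List Int) :
    (PySem.List.slice? xs (some 1) none 2).getD [] = pvAlt false xs := by
  rw [pvSliceOddAux, pvFModd]

-- the two independent halves of A's loop body
def pvFoldE : List Int → (Int × Int) → (Int × Int)
  | [], e => e
  | x :: t, (el, esl) =>
    pvFoldE t (if el < x then (x, el) else if esl < x then (el, x) else (el, esl))

def pvFoldO : List Int → (Option Int × Option Int) → (Option Int × Option Int)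
  | [], o => o
  | x :: t, (os, oss) =>
    pvFoldO t (if pvLtInf x os then (some x, os) else if pvLtInf x oss then (os, some x) else (os, oss))

theorem pvLoopA_split : ∀ (l : List Int) (i : Nat) (e : Int × Int) (o : Option Int × Option Int),
    pvLoopA l i e o = (pvFoldE (pvAlt (decide (i % 2 = 0)) l) e, pvFoldO (pvAlt (!decide (i % 2 = 0)) l) o) := by
  intro l
  induction l with
  | nil => intro i e o; cases h : decide (i % 2 = 0) <;> simp [pvLoopA, pvAlt, pvFoldE, pvFoldO]
  | cons x t ih =>
    intro i e o
    obtain ⟨el, esl⟩ := e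
    obtain ⟨os, oss⟩ := o
    by_cases h : i % 2 = 0
    · have h1 : ¬ ((i+1) % 2 = 0) := by omega
      simp only [pvLoopA, h, if_true]
      simp only [decide_true]
      simp only [pvAlt, Bool.not_true, pvFoldE]
      split_ifs <;> rw [ih] <;> rw [show decide ((i+1) % 2 = 0) = false by simpa using h1] <;> simp
    · have h1 : (i+1) % 2 = 0 := by omega
      simp only [pvLoopA, h, if_false]
      simp only [decide_false]
      simp only [pvAlt, Bool.not_false, pvFoldO]
      split_ifs <;> rw [ih] <;> rw [show decide ((i+1) % 2 = 0) = true by simpa using h1] <;> simp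

def pvTop2 (s : List Int) : Int × Int := ((s.getLast?).getD 0, (s.dropLast.getLast?).getD 0)
def pvBot2 (s : List Int) : Option Int × Option Int := (s[0]?, s[1]?)

theorem pvTop2_append (w v : List Int) (h : 2 ≤ v.length) : pvTop2 (w ++ v) = pvTop2 v := by
  have hv : v ≠ [] := by intro hv; simp [hv] at h
  have hd : v.dropLast ≠ [] := by
    intro hd
    have := congrArg List.length hd
    simp at this
    omega
  unfold pvTop2
  have h1 : v.getLast?.isSome := List.getLast?_isSome.mpr hv
  have h2 : v.dropLast.getLast?.isSome := List.getLast?_isSome.mpr hd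
  rw [List.getLast?_append, Option.or_of_isSome h1,
    List.dropLast_append_of_ne_nil hv, List.getLast?_append, Option.or_of_isSome h2]

theorem pvBot2_append (u w : List Int) (h : 2 ≤ u.length) : pvBot2 (u ++ w) = pvBot2 u := by
  unfold pvBot2
  rw [List.getElem?_append_left (by omega), List.getElem?_append_left (by omega)]

theorem pvK_top (m : List Int) (d : Int) (h : 2 ≤ m.countP (fun y => decide (d ≤ y))) :
    pvTop2 (PySem.List.sorted (d :: m) (fun x => x) false) = pvTop2 (PySem.List.sorted m (fun x => x) false) := by
  set s := PySem.List.sorted m (fun x => x) false with hs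
  have hperm : s.Perm m := PySem.List.sorted_perm m (fun x => x) false
  have hpw : s.Pairwise (· ≤ ·) := by
    have := PySem.List.sorted_pairwise m (fun x => x)
    simpa [← hs] using this
  set p : Int → Bool := fun y => decide (y < d) with hp
  set u := s.takeWhile p with hu
  set v := s.dropWhile p with hv
  have hsu : u ++ v = s := List.takeWhile_append_dropWhile
  have hum : ∀ x ∈ u, x < d := by
    intro x hx
    have := List.mem_takeWhile_imp hx
    simpa [hp] using this
  have hvm : ∀ y ∈ v, d ≤ y := by
    intro y hy
    cases hcv : v with
    | nil => rw [hcv] at hy; simp at hy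
    | cons v0 vt =>
      have hv0 : d ≤ v0 := by
        have := List.head?_dropWhile_not p s
        rw [← hv, hcv] at this
        simp [hp] at this
        omega
      have hpwv : v.Pairwise (· ≤ ·) := hpw.sublist (List.dropWhile_sublist p)
      rw [hcv] at hy hpwv
      rcases List.mem_cons.mp hy with rfl | hyt
      · exact hv0
      · exact le_trans hv0 ((List.pairwise_cons.mp hpwv).1 y hyt)
  have hpw2 : (u ++ d :: v).Pairwise (· ≤ ·) := by
    rw [List.pairwise_append]
    refine ⟨hpw.sublist (by rw [← hsu]; simp), ?_, ?_⟩
    · rw [List.pairwise_cons]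
      exact ⟨hvm, hpw.sublist (List.dropWhile_sublist p)⟩
    · intro x hx y hy
      rcases List.mem_cons.mp hy with rfl | hyv
      · exact le_of_lt (hum x hx)
      · have h1 := hum x hx
        have h2 := hvm y hyv
        omega
  have hperm2 : (u ++ d :: v).Perm (d :: m) := by
    calc (u ++ d :: v).Perm (d :: (u ++ v)) := List.perm_middle
    _ = d :: s := by rw [hsu]
    _ |>.Perm (d :: m) := hperm.cons d
  have hsd : PySem.List.sorted (d :: m) (fun x => x) false = u ++ d :: v :=
    PySem.List.sorted_id_eq_of_perm_of_pairwise _ _ hperm2 hpw2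
  have hcv : 2 ≤ v.length := by
    have hc1 : s.countP (fun y => decide (d ≤ y)) = m.countP (fun y => decide (d ≤ y)) :=
      hperm.countP_eq _
    have hc2 : u.countP (fun y => decide (d ≤ y)) = 0 := by
      rw [List.countP_eq_zero]
      intro x hx
      have := hum x hx
      simpa using by omega
    have hc3 : s.countP (fun y => decide (d ≤ y)) = u.countP (fun y => decide (d ≤ y)) + v.countP (fun y => decide (d ≤ y)) := by
      rw [← hsu, List.countP_append]
    have := List.countP_le_length (l := v) (p := fun y => decide (d ≤ y))
    omega
  rw [hsd]
  rw [show u ++ d :: v = (u ++ [d]) ++ v by simp]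
  rw [pvTop2_append _ _ hcv, ← hsu, pvTop2_append _ _ hcv]

theorem pvK_bot (m : List Int) (d : Int) (h : 2 ≤ m.countP (fun y => decide (y ≤ d))) :
    pvBot2 (PySem.List.sorted (d :: m) (fun x => x) false) = pvBot2 (PySem.List.sorted m (fun x => x) false) := by
  set s := PySem.List.sorted m (fun x => x) false with hs
  have hperm : s.Perm m := PySem.List.sorted_perm m (fun x => x) false
  have hpw : s.Pairwise (· ≤ ·) := by
    have := PySem.List.sorted_pairwise m (fun x => x)
    simpa [← hs] using this
  set p : Int → Bool := fun y => decide (y ≤ d) with hp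
  set u := s.takeWhile p with hu
  set v := s.dropWhile p with hv
  have hsu : u ++ v = s := List.takeWhile_append_dropWhile
  have hum : ∀ x ∈ u, x ≤ d := by
    intro x hx
    have := List.mem_takeWhile_imp hx
    simpa [hp] using this
  have hvm : ∀ y ∈ v, d < y := by
    intro y hy
    cases hcv : v with
    | nil => rw [hcv] at hy; simp at hy
    | cons v0 vt =>
      have hv0 : d < v0 := by
        have := List.head?_dropWhile_not p s
        rw [← hv, hcv] at this
        simp [hp] at this
        omega
      have hpwv : v.Pairwise (· ≤ ·) := hpw.sublist (List.dropWhile_sublist p)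
      rw [hcv] at hy hpwv
      rcases List.mem_cons.mp hy with rfl | hyt
      · exact hv0
      · exact lt_of_lt_of_le hv0 ((List.pairwise_cons.mp hpwv).1 y hyt)
  have hpw2 : (u ++ d :: v).Pairwise (· ≤ ·) := by
    rw [List.pairwise_append]
    refine ⟨hpw.sublist (by rw [← hsu]; simp), ?_, ?_⟩
    · rw [List.pairwise_cons]
      exact ⟨fun y hy => le_of_lt (hvm y hy), hpw.sublist (List.dropWhile_sublist p)⟩
    · intro x hx y hy
      rcases List.mem_cons.mp hy with rfl | hyv
      · exact hum x hx
      · have h1 := hum x hx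
        have h2 := hvm y hyv
        omega
  have hperm2 : (u ++ d :: v).Perm (d :: m) := by
    calc (u ++ d :: v).Perm (d :: (u ++ v)) := List.perm_middle
    _ = d :: s := by rw [hsu]
    _ |>.Perm (d :: m) := hperm.cons d
  have hsd : PySem.List.sorted (d :: m) (fun x => x) false = u ++ d :: v :=
    PySem.List.sorted_id_eq_of_perm_of_pairwise _ _ hperm2 hpw2
  have hcu : 2 ≤ u.length := by
    have hc1 : s.countP p = m.countP p := hperm.countP_eq _
    have hc2 : v.countP p = 0 := by
      rw [List.countP_eq_zero]
      intro x hx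
      have := hvm x hx
      simp [hp]
      omega
    have hc3 : s.countP p = u.countP p + v.countP p := by
      rw [← hsu, List.countP_append]
    have := List.countP_le_length (l := u) (p := p)
    have h4 : 2 ≤ m.countP p := by rw [hp]; exact h
    omega
  rw [hsd, pvBot2_append _ _ hcu, ← hsu, pvBot2_append _ _ hcu]

theorem pvSortedPerm (xs ys : List Int) (h : xs.Perm ys) :
    PySem.List.sorted xs (fun x => x) false = PySem.List.sorted ys (fun x => x) false :=
  PySem.List.sorted_eq_sorted_of_perm xs ys _ (fun _ _ hab => hab) h

theorem pvFoldE_sorted : ∀ (l : List Int) (a b : Int), b ≤ a →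
    pvFoldE l (a, b) = pvTop2 (PySem.List.sorted (b :: a :: l) (fun x => x) false) := by
  intro l
  induction l with
  | nil =>
    intro a b hba
    rw [PySem.List.sorted_eq_self_of_pairwise _ _ (by simp [hba])]
    simp [pvFoldE, pvTop2]
  | cons x t ih =>
    intro a b hba
    show pvFoldE t (if a < x then (x, a) else if b < x then (a, x) else (a, b)) = _
    by_cases h1 : a < x
    · rw [if_pos h1, ih x a (le_of_lt h1),
        ← pvK_top (a :: x :: t) b (by
          simp [show b ≤ x by omega, show b ≤ a by omega])]
    · rw [if_neg h1]
      by_cases h2 : b < x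
      · rw [if_pos h2, ih a x (by omega),
          ← pvK_top (x :: a :: t) b (by
            simp [show b ≤ x by omega, show b ≤ a by omega]),
          pvSortedPerm (b :: a :: x :: t) (b :: x :: a :: t) (List.Perm.cons b (List.Perm.swap x a t))]
      · rw [if_neg h2, ih a b hba,
          ← pvK_top (b :: a :: t) x (by
            simp [show x ≤ b by omega, show x ≤ a by omega]),
          pvSortedPerm (b :: a :: x :: t) (x :: b :: a :: t) (by
            have : ([b, a] ++ x :: t).Perm (x :: ([b, a] ++ t)) := List.perm_middle
            simpa using this)]

theorem pvFoldO_sorted : ∀ (l : List Int) (a b : Int), a ≤ b →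
    pvFoldO l (some a, some b) = pvBot2 (PySem.List.sorted (a :: b :: l) (fun x => x) false) := by
  intro l
  induction l with
  | nil =>
    intro a b hab
    rw [PySem.List.sorted_eq_self_of_pairwise _ _ (by simp [hab])]
    simp [pvFoldO, pvBot2]
  | cons x t ih =>
    intro a b hab
    show pvFoldO t (if pvLtInf x (some a) then (some x, some a) else if pvLtInf x (some b) then (some a, some x) else (some a, some b)) = _
    simp only [pvLtInf, decide_eq_true_eq]
    by_cases h1 : x < a
    · rw [if_pos h1, ih x a (le_of_lt h1),
        ← pvK_bot (x :: a :: t) b (by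
          simp [show x ≤ b by omega, show a ≤ b by omega]),
        pvSortedPerm (a :: b :: x :: t) (b :: x :: a :: t) (by
          have hm : ([b, x] ++ a :: t).Perm (a :: ([b, x] ++ t)) := List.perm_middle
          exact (by simpa using hm : (b :: x :: a :: t).Perm (a :: b :: x :: t)).symm)]
    · rw [if_neg h1]
      by_cases h2 : x < b
      · rw [if_pos h2, ih a x (by omega),
          ← pvK_bot (a :: x :: t) b (by
            simp [show x ≤ b by omega, show a ≤ b by omega]),
          pvSortedPerm (a :: b :: x :: t) (b :: a :: x :: t) (by
            have : ([a] ++ b :: x :: t).Perm (b :: ([a] ++ x :: t)) := List.perm_middle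
            simpa using this)]
      · rw [if_neg h2, ih a b hab,
          ← pvK_bot (a :: b :: t) x (by
            simp [show a ≤ x by omega, show b ≤ x by omega]),
          pvSortedPerm (a :: b :: x :: t) (x :: a :: b :: t) (by
            have : ([a, b] ++ x :: t).Perm (x :: ([a, b] ++ t)) := List.perm_middle
            simpa using this)]


theorem pvGet1 (s : List Int) (h : 2 ≤ s.length) : PySem.List.pyGet? s 1 = s[1]? := by
  simp [PySem.List.pyGet?, PySem.List.pyIdx?]
  rw [if_pos (by omega)]
  rfl

theorem pvGetNeg2 (s : List Int) (h : 2 ≤ s.length) :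
    PySem.List.pyGet? s (-2) = s.dropLast.getLast? := by
  have h1 : PySem.List.pyIdx? s.length (-2) = some (s.length - 2) := by
    simp [PySem.List.pyIdx?]
    omega
  rw [PySem.List.pyGet?, h1, Option.bind_some, List.getLast?_eq_getElem?, List.getElem?_dropLast]
  rw [List.length_dropLast, if_pos (by omega),
    show s.length - 1 - 1 = s.length - 2 by omega]

-- ===== VERDICT (by name: the statement is the Claim_ definition above) =====
theorem LargeSmallSum_spec : Claim_equal_LargeSmallSum := by
  intro arr _
  unfold Spec_LargeSmallSum LargeSmallSum LargeSmallSum_alt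
  by_cases hlen : arr.length ≤ 3
  · rw [if_pos hlen, if_pos hlen]
  · rw [if_neg hlen, if_neg hlen, pvLoopA_split]
    rw [pvSliceEven, pvSliceOdd]
    have hel : 2 ≤ (pvAlt true arr).length := by rw [pvAlt_length]; simp; omega
    have hol : 2 ≤ (pvAlt false arr).length := by rw [pvAlt_length]; simp; omega
    norm_num
    -- even side
    have heq : PySem.List.sorted (pvAlt true arr ++ [0, 0]) (fun x => x) false
        = PySem.List.sorted ((0 : Int) :: 0 :: pvAlt true arr) (fun x => x) false :=
      pvSortedPerm _ _ (List.perm_append_comm)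
    have helen : 2 ≤ (PySem.List.sorted (pvAlt true arr ++ [0, 0]) (fun x => x) false).length := by
      rw [(PySem.List.sorted_perm _ _ _).length_eq]
      simp
    have heven : (pvFoldE (pvAlt true arr) (0, 0)).2
        = (PySem.List.pyGet? (PySem.List.sorted (pvAlt true arr ++ [0, 0]) (fun x => x) false) (-2)).getD 0 := by
      rw [pvGetNeg2 _ helen, heq, pvFoldE_sorted _ 0 0 le_rfl]
      rfl
    -- odd side
    obtain ⟨y0, rest, ho⟩ : ∃ y0 rest, pvAlt false arr = y0 :: rest := by
      cases hc : pvAlt false arr with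
      | nil => rw [hc] at hol; simp at hol
      | cons y0 rest => exact ⟨y0, rest, rfl⟩
    obtain ⟨y1, t, hrest⟩ : ∃ y1 t, rest = y1 :: t := by
      cases hc : rest with
      | nil => rw [hc] at ho; rw [ho] at hol; simp at hol
      | cons y1 t => exact ⟨y1, t, rfl⟩
    rw [hrest] at ho
    have holen : 2 ≤ (PySem.List.sorted (pvAlt false arr) (fun x => x) false).length := by
      rw [(PySem.List.sorted_perm _ _ _).length_eq]
      omega
    have hodd : (pvFoldO (pvAlt false arr) (none, none)).2
        = PySem.List.pyGet? (PySem.List.sorted (pvAlt false arr) (fun x => x) false) 1 := by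
      rw [pvGet1 _ holen, ho]
      show (pvFoldO t (if pvLtInf y1 (some y0) then (some y1, some y0)
          else if pvLtInf y1 none then (some y0, some y1) else (some y0, none))).2 = _
      simp only [pvLtInf, decide_eq_true_eq, if_true]
      by_cases h10 : y1 < y0
      · rw [if_pos h10, pvFoldO_sorted t y1 y0 (le_of_lt h10),
          pvSortedPerm (y1 :: y0 :: t) (y0 :: y1 :: t) (List.Perm.swap y0 y1 t)]
        rfl
      · rw [if_neg h10, pvFoldO_sorted t y0 y1 (by omega)]
        rfl
    rw [heven, hodd]
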